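-- pv_equiv track=rewrite | github.com/essel-dev/jewcal | src/jewcal/utils/calculations.py | gregorian_to_absdate
-- ===== SOURCE A (Python) =====
-- def is_gregorian_leap(year: int) -> bool:
--     """Is the Gregorian year a leap year.
--
--     97 leap years occur every 400 years so that every year divisible by 4 is a
--     leap year, except if it is divisible by 100 and not divisible by 400.
--
--     Args:
--         year: The Gregorian year.
--
--     Returns:
--         True for leap year, False otherwise.
--     """
--     return bool(all([
--         ((year % 4) == 0),
--         ((year % 400) != 100),
--         ((year % 400) != 200),
--         ((year % 400) != 300),
--     ]))
--
-- def days_in_gregorian_month(month: int, year: int) -> int: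
--     """Get the number of days in a Gregorian month.
--
--     Args:
--         month: The Gregorian month.
--         year: The Gregorian year.
--
--     Returns:
--          The number of days.
--     """
--     if is_gregorian_leap(year) is True and month == 2:
--         return 29
--
--     lengths = [31, 28, 31, 30, 31, 30, 31, 31, 30, 31, 30, 31]
--     return lengths[month - 1]
--
-- def gregorian_to_absdate(year: int, month: int, day: int) -> int:
--     """Convert the Gregorian date to an absolute date number.
--
--     Args:
--         year: The Gregorian year.
--         month: The Gregorian month.
--         day: The Gregorian day.
--
--     Returns:
--         The absolute date number.
--     """
--     value = day
--     absdate = value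
--
--     # days in prior months this year
--     for i in range(1, month):
--         value = days_in_gregorian_month(i, year)
--         absdate += value
--
--     # days in prior years
--     value = 365 * (year - 1)
--     absdate += value
--
--     # Julian leap days in prior years
--     value = (year - 1) // 4
--     absdate += value
--
--     # minus prior century years
--     value = (year - 1) // 100
--     absdate -= value
--
--     # plus prior years divisible by 400
--     value = (year - 1) // 400
--     absdate += value
--
--     return absdate
-- ===== SOURCE B (Python) =====
-- _CUM = (0, 31, 59, 90, 120, 151, 181, 212, 243, 273, 304, 334, 365)
--
--
-- def _is_leap(year):
--     return year % 4 == 0 and (year % 100 != 0 or year % 400 == 0)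
--
--
-- def gregorian_to_absdate(year: int, month: int, day: int) -> int:
--     """Convert the Gregorian date to an absolute date number (table lookup, no loop)."""
--     prior = _CUM[month - 1] if month >= 1 else 0
--     if month > 2 and _is_leap(year):
--         prior += 1
--     y = year - 1
--     return day + prior + 365 * y + y // 4 - y // 100 + y // 400
-- ===== Notes on version B (the rewrite author's own statement) =====
-- stated objective: simpler
-- what changed: Replaced the per-month loop (which rebuilds each month's length and a leap check per iteration) with a precomputed cumulative-days prefix table indexed once, plus a single leap-day adjustment for month > 2.
import Mathlib
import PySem

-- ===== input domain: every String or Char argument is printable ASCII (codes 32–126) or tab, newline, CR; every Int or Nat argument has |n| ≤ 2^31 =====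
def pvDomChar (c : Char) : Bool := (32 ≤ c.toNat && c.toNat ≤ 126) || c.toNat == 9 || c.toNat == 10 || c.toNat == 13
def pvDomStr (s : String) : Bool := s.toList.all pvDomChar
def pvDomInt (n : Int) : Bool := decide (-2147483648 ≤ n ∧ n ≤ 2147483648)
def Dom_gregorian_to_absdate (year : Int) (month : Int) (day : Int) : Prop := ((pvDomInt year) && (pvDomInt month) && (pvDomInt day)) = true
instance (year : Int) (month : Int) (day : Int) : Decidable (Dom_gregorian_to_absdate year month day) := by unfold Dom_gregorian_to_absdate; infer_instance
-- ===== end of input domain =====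

-- B replaces A's per-month accumulation loop by a one-shot cumulative-days table lookup (objective: simpler).

-- ===== PORT A =====
def is_gregorian_leap (year : Int) : Bool :=
  (PySem.Int.mod year 4 == 0) && (PySem.Int.mod year 400 != 100) &&
  (PySem.Int.mod year 400 != 200) && (PySem.Int.mod year 400 != 300)

def days_in_gregorian_month (month : Int) (year : Int) : Int :=
  if is_gregorian_leap year && month == 2 then 29
  else
    -- lengths[month - 1]; IndexError (= none) is excluded by Pre_, the default is never read there
    (PySem.List.pyGet? [31, 28, 31, 30, 31, 30, 31, 31, 30, 31, 30, 31] (month - 1)).getD 0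

def gregorian_to_absdate (year : Int) (month : Int) (day : Int) : Int :=
  let absdate := (PySem.List.pyRange 1 month 1).foldl
    (fun acc i => acc + days_in_gregorian_month i year) day
  let absdate := absdate + 365 * (year - 1)
  let absdate := absdate + PySem.Int.floordiv (year - 1) 4
  let absdate := absdate - PySem.Int.floordiv (year - 1) 100
  absdate + PySem.Int.floordiv (year - 1) 400

-- ===== PORT B =====
def pvLeapAlt (year : Int) : Bool :=
  PySem.Int.mod year 4 == 0 && (PySem.Int.mod year 100 != 0 || PySem.Int.mod year 400 == 0)

def gregorian_to_absdate_alt (year : Int) (month : Int) (day : Int) : Int :=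
  let cum : List Int := [0, 31, 59, 90, 120, 151, 181, 212, 243, 273, 304, 334, 365]
  let prior := if 1 ≤ month then (PySem.List.pyGet? cum (month - 1)).getD 0 else 0
  let prior := if 2 < month ∧ pvLeapAlt year then prior + 1 else prior
  let y := year - 1
  day + prior + 365 * y + PySem.Int.floordiv y 4 - PySem.Int.floordiv y 100 + PySem.Int.floordiv y 400

-- ===== PRECONDITION & SPEC =====
-- Pre_ excludes exactly month ≥ 14, where A raises IndexError (lengths[month-1] out of range in the loop).
def Pre_gregorian_to_absdate (year : Int) (month : Int) (day : Int) : Prop := month ≤ 13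
instance (year : Int) (month : Int) (day : Int) : Decidable (Pre_gregorian_to_absdate year month day) := by unfold Pre_gregorian_to_absdate; infer_instance
def pvWitness_gregorian_to_absdate : Int × Int × Int := (2024, 3, 1)

def Spec_gregorian_to_absdate (year : Int) (month : Int) (day : Int) (out : Int) : Prop := out = gregorian_to_absdate_alt year month day
instance (year : Int) (month : Int) (day : Int) (out : Int) : Decidable (Spec_gregorian_to_absdate year month day out) := by unfold Spec_gregorian_to_absdate; infer_instance

-- ===== CLAIM (what is proved, stated in full; the proofs are below) =====
def Claim_equal_gregorian_to_absdate : Prop := ∀ (year : Int) (month : Int) (day : Int), Dom_gregorian_to_absdate year month day → Pre_gregorian_to_absdate year month day → Spec_gregorian_to_absdate year month day (gregorian_to_absdate year month day)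

-- ===== LEMMAS AND PROOFS =====
theorem leap_eq (year : Int) : is_gregorian_leap year = pvLeapAlt year := by
  simp only [is_gregorian_leap, pvLeapAlt,
    PySem.Int.mod_eq_emod_of_pos (show (0:Int) < 4 by norm_num),
    PySem.Int.mod_eq_emod_of_pos (show (0:Int) < 100 by norm_num),
    PySem.Int.mod_eq_emod_of_pos (show (0:Int) < 400 by norm_num)]
  rw [Bool.eq_iff_iff]
  simp only [Bool.and_eq_true, Bool.or_eq_true, bne_iff_ne, beq_iff_eq, ne_eq]
  omega

theorem sum_days (lp : Bool) (m : Int) (h1 : 1 ≤ m) (h2 : m ≤ 13) :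
    (List.map (fun i => if lp && i == 2 then (29:Int)
        else (PySem.List.pyGet? [31, 28, 31, 30, 31, 30, 31, 31, 30, 31, 30, 31] (i - 1)).getD 0)
      (PySem.List.pyRange 1 m 1)).sum =
    (PySem.List.pyGet? [(0:Int), 31, 59, 90, 120, 151, 181, 212, 243, 273, 304, 334, 365] (m - 1)).getD 0
      + (if 2 < m ∧ lp then 1 else 0) := by
  interval_cases m <;> cases lp <;> decide

theorem main_eq (year month day : Int) (h : month ≤ 13) :
    gregorian_to_absdate year month day = gregorian_to_absdate_alt year month day := by
  unfold gregorian_to_absdate gregorian_to_absdate_alt days_in_gregorian_month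
  simp only [leap_eq, PySem.List.foldl_add]
  by_cases h1 : 1 ≤ month
  · rw [sum_days (pvLeapAlt year) month h1 h, if_pos h1]
    split_ifs <;> ring
  · have he : PySem.List.pyRange 1 month 1 = [] := by
      rw [PySem.List.pyRange_one]
      have h0 : (month - 1).toNat = 0 := by omega
      simp [h0]
    rw [he, if_neg h1, if_neg (by omega : ¬ (2 < month ∧ pvLeapAlt year))]
    simp

-- ===== VERDICT (by name: the statement is the Claim_ definition above) =====
theorem gregorian_to_absdate_spec : Claim_equal_gregorian_to_absdate := by
  intro year month day _ hpre
  exact main_eq year month day hpre
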